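-- pv_equiv track=rewrite | github.com/rubentalstra/Trial-Submission-Studio | cdisc_transpiler/submission.py | _sanitize_qnam
-- ===== SOURCE A (Python) =====
-- def _sanitize_qnam(name: str) -> str:
--     """Convert a source column into a SAS-safe QNAM (<=8 chars, alnum/underscore)."""
--     safe = "".join(ch if ch.isalnum() else "_" for ch in name.upper())
--     while "__" in safe:
--         safe = safe.replace("__", "_")
--     safe = safe.strip("_")
--     if not safe:
--         safe = "QVAL"
--     if safe[0].isdigit():
--         safe = f"Q{safe}"
--     return safe[:8]
-- ===== SOURCE B (Python) =====
-- def _sanitize_qnam(name: str) -> str: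
--     out = []
--     prev_us = False
--     for ch in name.upper():
--         if ch.isalnum():
--             out.append(ch)
--             prev_us = False
--         elif not prev_us:
--             out.append("_")
--             prev_us = True
--     safe = "".join(out).strip("_")
--     if not safe:
--         safe = "QVAL"
--     if safe[0].isdigit():
--         safe = "Q" + safe
--     return safe[:8]
-- ===== Notes on version B (the rewrite author's own statement) =====
-- stated objective: simpler
-- what changed: Replaced the build-then-fixpoint pipeline (join of mapped chars, then a while loop repeatedly calling replace('__','_') until no double underscore remains) with a single forward scan over name.upper() that appends alnum chars and emits an underscore only when the previously emitted char was not an underscore, collapsing runs in one pass; the strip/QVAL/digit-prefix/truncate tail is unchanged.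
import Mathlib
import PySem

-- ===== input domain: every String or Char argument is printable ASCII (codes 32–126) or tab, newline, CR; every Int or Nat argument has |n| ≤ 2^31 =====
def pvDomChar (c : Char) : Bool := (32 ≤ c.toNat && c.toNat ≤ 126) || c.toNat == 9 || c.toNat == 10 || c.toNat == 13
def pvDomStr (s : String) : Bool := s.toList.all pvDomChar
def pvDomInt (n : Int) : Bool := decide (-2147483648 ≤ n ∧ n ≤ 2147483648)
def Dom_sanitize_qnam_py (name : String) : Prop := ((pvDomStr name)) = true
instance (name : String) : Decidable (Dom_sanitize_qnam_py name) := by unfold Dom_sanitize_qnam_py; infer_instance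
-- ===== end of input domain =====

-- B replaces A's repeated '__'→'_' replace-until-fixpoint loop by a single forward scan
-- with a previous-underscore flag (objective: simpler; one pass instead of the while-replace loop).


-- ===== PORT A =====
-- One application of Python's safe.replace("__", "_"); used only to prove termination of A's while loop.
def stepR : List Char → List Char
  | [] => []
  | '_' :: '_' :: t => '_' :: stepR t
  | c :: t => c :: stepR t

theorem stepR_cons {c : Char} {t : List Char}
    (h : ∀ u, c = '_' → t = '_' :: u → False) : stepR (c :: t) = c :: stepR t := by
  rw [stepR.eq_def]
  split
  · rename_i heq; cases heq
  · rename_i x t' heq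
    injection heq with h1 h2
    exact (h t' h1 h2).elim
  · rename_i x c' t' hno heq
    injection heq with h1 h2
    rw [h1, h2]

theorem go_eq (fuel : Nat) : ∀ (l acc : List Char), l.length ≤ fuel →
    PySem.Chars.replace.go ['_','_'] ['_'] fuel l acc = acc.reverse ++ stepR l := by
  induction fuel with
  | zero =>
    intro l acc h
    have : l = [] := by cases l <;> simp_all
    subst this; simp [PySem.Chars.replace.go, stepR]
  | succ n ih =>
    intro l acc h
    match l with
    | [] => simp [PySem.Chars.replace.go, stepR]
    | [c] =>
      rw [PySem.Chars.replace.go]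
      have hp : List.isPrefixOf ['_','_'] [c] = false := by simp [List.isPrefixOf]
      rw [hp]
      simp only [Bool.false_eq_true, if_false]
      rw [ih [] (c :: acc) (by simp)]
      by_cases hc : c = '_' <;> simp [stepR, hc]
    | c :: d :: u =>
      rw [PySem.Chars.replace.go]
      by_cases hc : c = '_' ∧ d = '_'
      · obtain ⟨hc1, hc2⟩ := hc; subst hc1; subst hc2
        have hp : List.isPrefixOf ['_','_'] ('_' :: '_' :: u) = true := by
          simp [List.isPrefixOf]
        rw [hp]
        simp only [if_true]
        have hu : u.length ≤ n := by simp at h; omega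
        rw [show List.drop (['_','_'] : List Char).length ('_' :: '_' :: u) = u by simp]
        rw [show (['_'] : List Char).reverse ++ acc = '_' :: acc from rfl]
        rw [ih u ('_' :: acc) hu]
        simp [stepR]
      · have hp : List.isPrefixOf ['_','_'] (c :: d :: u) = false := by
          rcases not_and_or.mp hc with hc' | hc'
          · simp [List.isPrefixOf]; intro h2; exact absurd h2.symm hc'
          · simp [List.isPrefixOf]; intro _ h2; exact absurd h2.symm hc'
        rw [hp]
        simp only [Bool.false_eq_true, if_false]
        rw [ih (d :: u) (c :: acc) (by simp at h ⊢; omega)]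
        rw [stepR_cons (fun u' h1 h2 => hc ⟨h1, by cases h2; rfl⟩)]
        simp

theorem replace_eq_stepR (s : List Char) :
    PySem.Chars.replace s ['_','_'] ['_'] = stepR s := by
  rw [PySem.Chars.replace]
  simp only [List.isEmpty_cons]
  exact go_eq s.length s [] le_rfl

theorem stepR_len_le (s : List Char) : (stepR s).length ≤ s.length := by
  induction s using stepR.induct <;> simp [stepR] <;> omega

theorem stepR_len_lt {s : List Char} (h : ['_','_'] <:+: s) :
    (stepR s).length < s.length := by
  induction s using stepR.induct with
  | case1 => simp at h
  | case2 t ih =>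
    have := stepR_len_le t
    simp [stepR]; omega
  | case3 c t hnotpair ih =>
    rw [stepR_cons hnotpair]
    have ht : ['_','_'] <:+: t := by
      rcases (List.infix_cons_iff).mp h with hpre | hinf
      · exfalso
        obtain ⟨r, hr⟩ := hpre
        cases t with
        | nil => simp at hr
        | cons d u =>
          injection hr with h1 h2
          injection h2 with h3 h4
          exact hnotpair u h1.symm (by rw [← h3])
      · exact hinf
    have := ih ht
    simp; omega

-- A's while loop: while "__" in safe: safe = safe.replace("__", "_")
def sanitizeWhileA (safe : List Char) : List Char :=
  if PySem.Chars.isIn ['_','_'] safe then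
    sanitizeWhileA (PySem.Chars.replace safe ['_','_'] ['_'])
  else safe
termination_by safe.length
decreasing_by
  rw [replace_eq_stepR]
  exact stepR_len_lt ((PySem.Chars.isIn_iff_infix _ _).mp (by assumption))

def sanitize_qnam_py (name : String) : String :=
  -- safe = "".join(ch if ch.isalnum() else "_" for ch in name.upper())
  let safe0 := (PySem.Chars.upper name.toList).map
      (fun ch => if PySem.Chars.isalnum ch then ch else '_')
  -- while "__" in safe: safe = safe.replace("__", "_")   ("__" is ['_','_'])
  let safe1 := sanitizeWhileA safe0
  -- safe = safe.strip("_")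
  let safe2 := PySem.Chars.stripChars safe1 ['_']
  -- if not safe: safe = "QVAL"
  let safe3 := if safe2.isEmpty then ['Q','V','A','L'] else safe2
  -- if safe[0].isdigit(): safe = "Q" + safe   (safe3 is never empty; [] arm unreachable)
  let safe4 := match safe3 with
    | c :: _ => if PySem.Chars.isdigit c then 'Q' :: safe3 else safe3
    | [] => safe3
  -- return safe[:8]
  String.ofList (PySem.Chars.slice safe4 none (some 8))

-- ===== PORT B =====
def sanitize_qnam_py_alt (name : String) : String :=
  -- one forward pass over name.upper() with a prev-underscore flag
  let st := (PySem.Chars.upper name.toList).foldl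
      (fun (st : List Char × Bool) ch =>
        if PySem.Chars.isalnum ch then (st.1 ++ [ch], false)
        else if st.2 then st
        else (st.1 ++ ['_'], true))
      ([], false)
  -- safe = "".join(out).strip("_")
  let safe1 := PySem.Chars.stripChars st.1 ['_']
  -- if not safe: safe = "QVAL"
  let safe2 := if safe1.isEmpty then ['Q','V','A','L'] else safe1
  -- if safe[0].isdigit(): safe = "Q" + safe   (safe2 is never empty; [] arm unreachable)
  let safe3 := match safe2 with
    | c :: _ => if PySem.Chars.isdigit c then 'Q' :: safe2 else safe2
    | [] => safe2
  -- return safe[:8]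
  String.ofList (PySem.Chars.slice safe3 none (some 8))

-- ===== PRECONDITION & SPEC =====
def Spec_sanitize_qnam_py (name : String) (out : String) : Prop := out = sanitize_qnam_py_alt name
instance (name : String) (out : String) : Decidable (Spec_sanitize_qnam_py name out) := by unfold Spec_sanitize_qnam_py; infer_instance

-- ===== CLAIM (what is proved, stated in full; the proofs are below) =====
def Claim_equal_sanitize_qnam_py : Prop := ∀ (name : String), Dom_sanitize_qnam_py name → Spec_sanitize_qnam_py name (sanitize_qnam_py name)

-- ===== LEMMAS AND PROOFS =====
-- Run-collapsing scan over the already-mapped list (A's world).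
def colGoM : Bool → List Char → List Char
  | _, [] => []
  | prev, c :: t =>
    if c = '_' then (if prev then colGoM true t else '_' :: colGoM true t)
    else c :: colGoM false t

theorem colGoM_stepR (m : List Char) : ∀ prev, colGoM prev (stepR m) = colGoM prev m := by
  induction m using stepR.induct with
  | case1 => intro prev; rfl
  | case2 t ih =>
    intro prev
    by_cases hp : prev <;> simp [stepR, colGoM, hp, ih]
  | case3 c t hnotpair ih =>
    intro prev
    have hs : stepR (c :: t) = c :: stepR t := by
      rw [stepR.eq_def]
      cases c with
      | mk v h' =>
        cases t with
        | nil => split <;> simp_all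
        | cons d u => split <;> simp_all
    rw [hs]
    by_cases hc : c = '_'
    · by_cases hp : prev <;> simp [colGoM, hc, hp, ih]
    · simp [colGoM, hc, ih]

theorem colGoM_true_of_head {t : List Char} (h : ∀ u, t ≠ '_' :: u) :
    colGoM true t = colGoM false t := by
  cases t with
  | nil => rfl
  | cons d u =>
    have hd : d ≠ '_' := fun hdu => h u (by rw [hdu])
    simp [colGoM, hd]

theorem colGoM_id : ∀ {m : List Char}, ¬ ['_','_'] <:+: m → colGoM false m = m := by
  intro m
  induction m with
  | nil => intro _; rfl
  | cons c t ih =>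
    intro h
    have ht : ¬ ['_','_'] <:+: t := fun h' => h ((List.infix_cons_iff).mpr (Or.inr h'))
    by_cases hc : c = '_'
    · subst hc
      have hhead : ∀ u, t ≠ '_' :: u := by
        intro u hu
        exact h ((List.infix_cons_iff).mpr (Or.inl (by rw [hu]; exact ⟨u, by simp⟩)))
      show (if ('_' : Char) = '_' then (if False then colGoM true t else '_' :: colGoM true t) else '_' :: colGoM false t) = '_' :: t
      rw [if_pos rfl, if_neg (by simp), colGoM_true_of_head hhead, ih ht]
    · simp [colGoM, hc, ih ht]

theorem whileA_eq (m : List Char) : sanitizeWhileA m = colGoM false m := by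
  by_cases h : PySem.Chars.isIn ['_','_'] m = true
  · rw [sanitizeWhileA, if_pos h, replace_eq_stepR, whileA_eq (stepR m), colGoM_stepR]
  · rw [sanitizeWhileA, if_neg h]
    exact (colGoM_id ((PySem.Chars.isIn_eq_false_iff _ _).mp (Bool.not_eq_true _ ▸ by simpa using h))).symm
termination_by m.length
decreasing_by
  exact stepR_len_lt ((PySem.Chars.isIn_iff_infix _ _).mp h)

-- Run-collapsing scan over the raw (uppercased) list (B's world).
def colGo : Bool → List Char → List Char
  | _, [] => []
  | prev, c :: t =>
    if PySem.Chars.isalnum c then c :: colGo false t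
    else if prev then colGo true t
    else '_' :: colGo true t

theorem foldB (s : List Char) : ∀ (acc : List Char) (prev : Bool),
    (s.foldl (fun (st : List Char × Bool) ch =>
        if PySem.Chars.isalnum ch then (st.1 ++ [ch], false)
        else if st.2 then st
        else (st.1 ++ ['_'], true)) (acc, prev)).1 = acc ++ colGo prev s := by
  induction s with
  | nil => intro acc prev; simp [colGo]
  | cons c t ih =>
    intro acc prev
    by_cases hc : PySem.Chars.isalnum c
    · simp [colGo, hc, ih]
    · by_cases hp : prev <;> simp [colGo, hc, hp, ih]

theorem colGo_eq_colGoM (s : List Char) : ∀ prev,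
    colGo prev s = colGoM prev (s.map (fun ch => if PySem.Chars.isalnum ch then ch else '_')) := by
  induction s with
  | nil => intro prev; rfl
  | cons c t ih =>
    intro prev
    by_cases hc : PySem.Chars.isalnum c
    · have hcu : c ≠ '_' := by
        intro h; rw [h] at hc; exact absurd hc (by decide)
      simp [colGo, colGoM, hc, hcu, ih]
    · by_cases hp : prev <;> simp [colGo, colGoM, hc, hp, ih]

-- ===== VERDICT (by name: the statement is the Claim_ definition above) =====
theorem sanitize_qnam_py_spec : Claim_equal_sanitize_qnam_py := by
  intro name _
  unfold Spec_sanitize_qnam_py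
  simp only [sanitize_qnam_py, sanitize_qnam_py_alt, whileA_eq, foldB, ← colGo_eq_colGoM,
    List.nil_append]
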